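-- pv_equiv track=rewrite | github.com/Seojeil/Algorithm_Practice | python/071-080/075 - 숫자 카드 나누기.py | solution
-- ===== SOURCE A (Python) =====
-- from functools import reduce
--
-- def gcd(a, b):
--     while b != 0:
--         a, b = b, a % b
--     return a
--
-- def solution(arrayA, arrayB):
--     result_a = 0
--     result_b = 0
--
--     gcd_a = reduce(gcd, arrayA)
--     gcd_b = reduce(gcd, arrayB)
--
--     divisor_a = []
--     divisor_b = []
--
--     for a in range(1, gcd_a + 1):
--         if gcd_a % a == 0:
--             divisor_a.append(a)
--     for b in range(1, gcd_b + 1):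
--         if gcd_b % b == 0:
--             divisor_b.append(b)
--
--     while divisor_a:
--         k = divisor_a.pop()
--         for arr_b in arrayB:
--             if arr_b % k == 0:
--                 break
--         else:
--             result_a = k
--         break
--
--     while divisor_b:
--         k = divisor_b.pop()
--         for arr_a in arrayA:
--             if arr_a % k == 0:
--                 break
--         else:
--             result_b = k
--         break
--
--     return max(result_a, result_b)
-- ===== SOURCE B (Python) =====
-- from functools import reduce
--
-- def gcd(a, b):
--     while b != 0:
--         a, b = b, a % b
--     return a
--
-- def _largest(g, other):
--     # scan all divisors of g (enumerated in O(sqrt g) pairs), keep the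
--     # largest one that divides no element of `other`
--     res = 0
--     d = 1
--     while d * d <= g:
--         if g % d == 0:
--             for k in (d, g // d):
--                 if k > res and all(x % k != 0 for x in other):
--                     res = k
--         d += 1
--     return res
--
-- def solution(arrayA, arrayB):
--     return max(_largest(reduce(gcd, arrayA), arrayB),
--                _largest(reduce(gcd, arrayB), arrayA))
-- ===== Notes on version B (the rewrite author's own statement) =====
-- stated objective: alternative
-- what changed: A builds the full divisor list of each gcd by scanning 1..gcd and then only pops/tests the last entry; B enumerates divisors in paired form d, g//d up to sqrt(g) and keeps a running maximum over all divisors that divide nothing in the other array.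
import Mathlib
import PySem

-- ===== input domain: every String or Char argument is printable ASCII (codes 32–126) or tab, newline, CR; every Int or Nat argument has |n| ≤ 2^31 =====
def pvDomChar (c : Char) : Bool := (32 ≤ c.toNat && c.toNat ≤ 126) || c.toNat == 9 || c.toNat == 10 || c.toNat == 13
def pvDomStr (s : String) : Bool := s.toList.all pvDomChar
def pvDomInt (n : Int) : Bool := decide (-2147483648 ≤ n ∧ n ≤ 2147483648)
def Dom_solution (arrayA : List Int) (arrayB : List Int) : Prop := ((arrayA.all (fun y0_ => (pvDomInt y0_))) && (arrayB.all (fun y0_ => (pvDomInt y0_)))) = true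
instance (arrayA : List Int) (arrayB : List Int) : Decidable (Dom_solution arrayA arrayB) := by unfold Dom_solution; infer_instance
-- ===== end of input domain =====

-- B replaces A's linear 1..gcd divisor-list construction and pop loops by a paired
-- sqrt-bounded divisor enumeration that keeps a running maximum over all divisors
-- dividing nothing in the other array (objective: alternative).

-- shared helper: the Python `gcd` with Python's floored `%` (both Source A and Source B define it)
def pygcd (a b : Int) : Int :=
  if hb : b = 0 then a else pygcd b (PySem.Int.mod a b)
termination_by b.natAbs
decreasing_by
  rcases lt_trichotomy b 0 with h | h | h
  · have := PySem.Int.mod_neg_bounds a h; omega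
  · exact absurd h hb
  · have h1 := PySem.Int.mod_nonneg a h; have h2 := PySem.Int.mod_lt a h; omega

-- functools.reduce(gcd, xs); Python raises TypeError on [], excluded by Pre_ (junk value 0 there)
def pyReduceGcd (xs : List Int) : Int :=
  match xs with
  | [] => 0
  | h :: t => t.foldl pygcd h

-- ===== PORT A =====
def solution (arrayA : List Int) (arrayB : List Int) : Int :=
  let result_a : Int := 0
  let result_b : Int := 0
  let gcd_a := pyReduceGcd arrayA
  let gcd_b := pyReduceGcd arrayB
  let divisor_a := (PySem.List.pyRange 1 (gcd_a + 1) 1).foldl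
      (fun acc a => if PySem.Int.mod gcd_a a = 0 then acc ++ [a] else acc) []
  let divisor_b := (PySem.List.pyRange 1 (gcd_b + 1) 1).foldl
      (fun acc b => if PySem.Int.mod gcd_b b = 0 then acc ++ [b] else acc) []
  -- while divisor_a: k = divisor_a.pop(); for arr_b in arrayB: if arr_b % k == 0: break / else: result_a = k; break
  let result_a :=
    match PySem.List.pop? divisor_a (-1) with
    | none => result_a
    | some (k, _) =>
        if arrayB.any (fun arr_b => PySem.Int.mod arr_b k = 0) then result_a else k
  let result_b :=
    match PySem.List.pop? divisor_b (-1) with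
    | none => result_b
    | some (k, _) =>
        if arrayA.any (fun arr_a => PySem.Int.mod arr_a k = 0) then result_b else k
  max result_a result_b

-- ===== PORT B =====
-- `if k > res and all(x % k != 0 for x in other): res = k` for one candidate k
def tryCand (res k : Int) (other : List Int) : Int :=
  if res < k ∧ other.all (fun x => !(PySem.Int.mod x k == 0)) then k else res

-- the `while d*d <= g` loop of Source B's _largest, with the 2-element tuple loop unrolled
def divScan (g d res : Int) (other : List Int) : Int :=
  if d * d ≤ g then
    divScan g (d + 1)
      (if PySem.Int.mod g d = 0 then
        tryCand (tryCand res d other) (PySem.Int.floordiv g d) other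
      else res) other
  else res
termination_by (g + 1 - d).toNat
decreasing_by
  rename_i h
  have hdd : d ≤ d * d := by nlinarith [sq_nonneg (d - 1)]
  omega

def largest (g : Int) (other : List Int) : Int := divScan g 1 0 other

def solution_alt (arrayA : List Int) (arrayB : List Int) : Int :=
  max (largest (pyReduceGcd arrayA) arrayB) (largest (pyReduceGcd arrayB) arrayA)

-- ===== PRECONDITION & SPEC =====
-- Pre_ excludes empty arrays: reduce() over an empty list raises TypeError in both A and B.
def Pre_solution (arrayA : List Int) (arrayB : List Int) : Prop := arrayA ≠ [] ∧ arrayB ≠ []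
instance (arrayA : List Int) (arrayB : List Int) : Decidable (Pre_solution arrayA arrayB) := by unfold Pre_solution; infer_instance
def pvWitness_solution : List Int × List Int := ([12, 18], [5, 7])

def Spec_solution (arrayA : List Int) (arrayB : List Int) (out : Int) : Prop := out = solution_alt arrayA arrayB
instance (arrayA : List Int) (arrayB : List Int) (out : Int) : Decidable (Spec_solution arrayA arrayB out) := by unfold Spec_solution; infer_instance

-- ===== CLAIM (what is proved, stated in full; the proofs are below) =====
def Claim_equal_solution : Prop := ∀ (arrayA : List Int) (arrayB : List Int), Dom_solution arrayA arrayB → Pre_solution arrayA arrayB → Spec_solution arrayA arrayB (solution arrayA arrayB)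

-- ===== LEMMAS AND PROOFS =====

-- the common value both programs compute: g if g > 0 and g divides no element of `other`, else 0
def best (g : Int) (other : List Int) : Int :=
  if 0 < g ∧ ¬ (other.any (fun x => PySem.Int.mod x g = 0)) then g else 0

-- A's divisor-list branch computes exactly `best g other`
theorem branch_eq_best (g : Int) (other : List Int) :
    (match PySem.List.pop?
        ((PySem.List.pyRange 1 (g + 1) 1).foldl
          (fun acc a => if PySem.Int.mod g a = 0 then acc ++ [a] else acc) []) (-1) with
      | none => (0 : Int)
      | some (k, _) =>
          if other.any (fun x => PySem.Int.mod x k = 0) then 0 else k) = best g other := by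
  rw [PySem.List.foldl_append_ite_eq_filter]
  rcases le_or_gt g 0 with hg | hg
  · rw [PySem.List.pyRange_one_eq_nil (by omega)]
    simp [PySem.List.pop?, best, not_lt_of_ge hg]
  · rw [PySem.List.pyRange_one_succ_right (by omega), List.filter_append]
    have hgg : PySem.Int.mod g g = 0 := (PySem.Int.mod_eq_zero_iff_dvd g g).mpr dvd_rfl
    simp only [List.filter_cons, List.filter_nil, hgg, decide_true, if_true]
    rw [List.nil_append, PySem.List.pop?_last]
    simp only [best, hg, true_and]
    by_cases h : other.any (fun x => PySem.Int.mod x g = 0)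
    · simp [h]
    · simp [h]

theorem tryCand_of_mem (res k : Int) (other : List Int) (b0 : Int)
    (hb0 : b0 ∈ other) (hk : PySem.Int.mod b0 k = 0) : tryCand res k other = res := by
  unfold tryCand
  rw [if_neg]
  rintro ⟨-, hall⟩
  have := List.all_eq_true.mp hall b0 hb0
  simp [hk] at this

theorem tryCand_of_le (res k : Int) (other : List Int) (hk : k ≤ res) :
    tryCand res k other = res := by
  unfold tryCand
  rw [if_neg]
  rintro ⟨hlt, -⟩
  omega

-- if g > 0 divides some element of `other`, every divisor of g does, so the scan keeps 0
theorem divScan_stay0 (g : Int) (other : List Int) (b0 : Int)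
    (hb0 : b0 ∈ other) (hdvd : g ∣ b0) (hg : 0 < g) :
    ∀ (n : Nat) (d : Int), 1 ≤ d → (g + 1 - d).toNat ≤ n → divScan g d 0 other = 0 := by
  intro n
  induction n with
  | zero =>
      intro d hd hn
      have hc : ¬ (d * d ≤ g) := by
        intro hdd
        have hdle : d ≤ d * d := by nlinarith [sq_nonneg (d - 1)]
        omega
      rw [divScan, if_neg hc]
  | succ m ih =>
      intro d hd hn
      rw [divScan]
      by_cases hdd : d * d ≤ g
      · rw [if_pos hdd]
        have hdg : d ≤ g := by nlinarith [sq_nonneg (d - 1)]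
        have hres : (if PySem.Int.mod g d = 0 then
            tryCand (tryCand 0 d other) (PySem.Int.floordiv g d) other else 0) = 0 := by
          by_cases hmod : PySem.Int.mod g d = 0
          · rw [if_pos hmod]
            have hddvd : d ∣ g := (PySem.Int.mod_eq_zero_iff_dvd g d).mp hmod
            have h1 : PySem.Int.mod b0 d = 0 :=
              (PySem.Int.mod_eq_zero_iff_dvd b0 d).mpr (dvd_trans hddvd hdvd)
            have hq : PySem.Int.floordiv g d ∣ g := by
              rw [PySem.Int.floordiv_eq_ediv_of_pos (by omega : (0:Int) < d)]
              exact Int.ediv_dvd_of_dvd hddvd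
            have h2 : PySem.Int.mod b0 (PySem.Int.floordiv g d) = 0 :=
              (PySem.Int.mod_eq_zero_iff_dvd b0 _).mpr (dvd_trans hq hdvd)
            rw [tryCand_of_mem _ _ _ b0 hb0 h1, tryCand_of_mem _ _ _ b0 hb0 h2]
          · rw [if_neg hmod]
        rw [hres]
        exact ih (d + 1) (by omega) (by omega)
      · rw [if_neg hdd]

-- once the scan holds g itself, no candidate (all are ≤ g) can replace it
theorem divScan_stayg (g : Int) (other : List Int) (hg : 0 < g) :
    ∀ (n : Nat) (d : Int), 1 ≤ d → (g + 1 - d).toNat ≤ n → divScan g d g other = g := by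
  intro n
  induction n with
  | zero =>
      intro d hd hn
      have hc : ¬ (d * d ≤ g) := by
        intro hdd
        have hdle : d ≤ d * d := by nlinarith [sq_nonneg (d - 1)]
        omega
      rw [divScan, if_neg hc]
  | succ m ih =>
      intro d hd hn
      rw [divScan]
      by_cases hdd : d * d ≤ g
      · rw [if_pos hdd]
        have hdg : d ≤ g := by nlinarith [sq_nonneg (d - 1)]
        have hres : (if PySem.Int.mod g d = 0 then
            tryCand (tryCand g d other) (PySem.Int.floordiv g d) other else g) = g := by
          by_cases hmod : PySem.Int.mod g d = 0
          · rw [if_pos hmod]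
            have hqle : PySem.Int.floordiv g d ≤ g := by
              rw [PySem.Int.floordiv_eq_ediv_of_pos (by omega : (0:Int) < d)]
              exact Int.ediv_le_self d (by omega)
            rw [tryCand_of_le _ _ _ hdg, tryCand_of_le _ _ _ hqle]
          · rw [if_neg hmod]
        rw [hres]
        exact ih (d + 1) (by omega) (by omega)
      · rw [if_neg hdd]

theorem largest_eq_best (g : Int) (other : List Int) : largest g other = best g other := by
  unfold largest best
  rcases le_or_gt g 0 with hg | hg
  · rw [divScan, if_neg (by nlinarith [sq_nonneg (1 - 1 : Int)] : ¬ ((1:Int) * 1 ≤ g)),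
      if_neg (by rintro ⟨h, -⟩; omega)]
  · by_cases hany : other.any (fun x => PySem.Int.mod x g = 0)
    · -- some element is divisible by g: every divisor fails, result 0
      obtain ⟨b0, hb0, hmod⟩ := List.any_eq_true.mp hany
      have hdvd : g ∣ b0 := (PySem.Int.mod_eq_zero_iff_dvd b0 g).mp (by simpa using hmod)
      rw [if_neg (by rintro ⟨-, hno⟩; exact hno hany)]
      exact divScan_stay0 g other b0 hb0 hdvd hg _ 1 le_rfl le_rfl
    · -- no element divisible by g: the first candidate pair (1, g) already sets res = g
      have hnone : ∀ x ∈ other, ¬ PySem.Int.mod x g = 0 := by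
        intro x hx h
        exact hany (List.any_eq_true.mpr ⟨x, hx, by simp [h]⟩)
      rw [if_pos ⟨hg, hany⟩]
      rw [divScan, if_pos (by nlinarith : (1:Int) * 1 ≤ g)]
      have hm1 : PySem.Int.mod g 1 = 0 := (PySem.Int.mod_eq_zero_iff_dvd g 1).mpr (one_dvd g)
      have hf1 : PySem.Int.floordiv g 1 = g := by
        rw [PySem.Int.floordiv_eq_ediv_of_pos (by norm_num : (0:Int) < 1), Int.ediv_one]
      rw [if_pos hm1, hf1]
      have hall : other.all (fun x => !(PySem.Int.mod x g == 0)) = true := by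
        rw [List.all_eq_true]; intro x hx; simpa using hnone x hx
      have hres : tryCand (tryCand 0 1 other) g other = g := by
        by_cases hemp : other = []
        · subst hemp
          unfold tryCand
          simp only [List.all_nil, and_true]
          rcases eq_or_lt_of_le (by omega : (1:Int) ≤ g) with h1 | h1
          · rw [← h1]; norm_num
          · rw [if_pos (by norm_num : (0:Int) < 1), if_pos (by omega)]
        · obtain ⟨x0, hx0⟩ := List.exists_mem_of_ne_nil other hemp
          have h1 : tryCand 0 1 other = 0 :=
            tryCand_of_mem _ _ _ x0 hx0 ((PySem.Int.mod_eq_zero_iff_dvd x0 1).mpr (one_dvd x0))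
          rw [h1]
          unfold tryCand
          rw [if_pos ⟨hg, hall⟩]
      rw [hres]
      exact divScan_stayg g other hg _ 2 (by omega) le_rfl

-- ===== VERDICT (by name: the statement is the Claim_ definition above) =====
theorem solution_spec : Claim_equal_solution := by
  intro arrayA arrayB _ _
  unfold Spec_solution solution solution_alt
  simp only []
  rw [branch_eq_best (pyReduceGcd arrayA) arrayB, branch_eq_best (pyReduceGcd arrayB) arrayA,
    largest_eq_best (pyReduceGcd arrayA) arrayB, largest_eq_best (pyReduceGcd arrayB) arrayA]
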